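-- pv_equiv track=rewrite | github.com/Floralscent/Coding-Test-Practice | Python3/프로그래머스/2/138476. 귤 고르기/귤 고르기.py | solution
-- ===== SOURCE A (Python) =====
-- from collections import Counter
--
-- def solution(k, tangerine):
--     cnt = Counter(tangerine)
--     li = [(x,y) for x, y in cnt.items()] # 종류 갯수
--     li.sort(key= lambda x : (-x[1], x[0]))
--     tmp = 0; idx = 0
--     answer = 0
--     while tmp< k:
--         tmp += li[idx][1]
--         idx +=1
--         answer+=1
--
--     return answer
-- ===== SOURCE B (Python) =====
-- def solution(k, tangerine):
--     # Counting sort on frequencies: O(n) instead of comparison-sorting the (value, count) pairs.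
--     counts = {}
--     for t in tangerine:
--         counts[t] = counts.get(t, 0) + 1
--     buckets = {}
--     for c in counts.values():
--         buckets[c] = buckets.get(c, 0) + 1
--     freqs = [f for f in range(len(tangerine), 0, -1) for _ in range(buckets.get(f, 0))]
--     tmp = 0
--     answer = 0
--     for f in freqs:
--         if tmp >= k:
--             break
--         tmp += f
--         answer += 1
--     return answer
-- ===== Notes on version B (the rewrite author's own statement) =====
-- stated objective: faster
-- what changed: Replaces Counter + comparison sort of (value,count) pairs with a counting sort over frequency buckets (frequencies are bounded by len(tangerine)), then the same greedy take of the largest frequencies; the tie-break by value in A is irrelevant to the returned count.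
import Mathlib
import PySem

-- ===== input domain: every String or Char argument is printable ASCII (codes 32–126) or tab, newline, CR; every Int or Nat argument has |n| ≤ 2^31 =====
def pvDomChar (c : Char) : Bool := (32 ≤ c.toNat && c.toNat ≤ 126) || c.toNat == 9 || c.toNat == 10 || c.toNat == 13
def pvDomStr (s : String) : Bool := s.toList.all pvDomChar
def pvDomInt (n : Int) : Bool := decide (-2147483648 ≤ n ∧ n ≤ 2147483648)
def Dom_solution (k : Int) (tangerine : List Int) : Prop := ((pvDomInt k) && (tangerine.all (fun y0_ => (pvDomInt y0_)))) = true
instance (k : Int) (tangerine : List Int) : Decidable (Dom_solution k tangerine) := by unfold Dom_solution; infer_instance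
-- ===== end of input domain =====

-- B changes the algorithm (counting sort on frequency buckets instead of Counter + comparison sort); equivalence of the return value is proved below.

-- ===== PORT A =====
-- the 'while tmp < k' loop of A, recursing on the unread suffix of li;
-- on [] Python would raise IndexError (excluded by Pre_solution) — we return answer there
def loopA (k : Int) : List (Int × Int) → Int → Int → Int
  | li, tmp, answer =>
    if tmp < k then
      match li with
      | [] => answer
      | p :: t => loopA k t (tmp + p.2) (answer + 1)
    else answer

def solution (k : Int) (tangerine : List Int) : Int :=
  let cnt := PySem.Dict.counter tangerine
  let li := cnt.items.map (fun xy => (xy.1, xy.2))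
  let liS := PySem.List.sorted2 li (fun x => -x.2) (fun x => x.1) false
  loopA k liS 0 0

-- ===== PORT B =====
-- the 'for f in freqs' loop with its break
def greedyB (k : Int) : List Int → Int → Int → Int
  | [], _, answer => answer
  | f :: t, tmp, answer => if tmp ≥ k then answer else greedyB k t (tmp + f) (answer + 1)

def solution_alt (k : Int) (tangerine : List Int) : Int :=
  let counts := tangerine.foldl (fun d t => d.insert t (d.getD t 0 + 1)) PySem.Dict.empty
  let buckets := counts.values.foldl (fun d c => d.insert c (d.getD c 0 + 1)) PySem.Dict.empty
  let freqs := (PySem.List.pyRange (tangerine.length : Int) 0 (-1)).flatMap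
    (fun f => (PySem.List.pyRange 0 (buckets.getD f 0) 1).map (fun _ => f))
  greedyB k freqs 0 0

-- ===== PRECONDITION & SPEC =====
-- A raises IndexError when k exceeds the number of tangerines (the greedy loop runs off the sorted list)
def Pre_solution (k : Int) (tangerine : List Int) : Prop := k ≤ (tangerine.length : Int)
instance (k : Int) (tangerine : List Int) : Decidable (Pre_solution k tangerine) := by unfold Pre_solution; infer_instance
def pvWitness_solution : Int × List Int := (2, [1, 2, 2, 3])

def Spec_solution (k : Int) (tangerine : List Int) (out : Int) : Prop := out = solution_alt k tangerine
instance (k : Int) (tangerine : List Int) (out : Int) : Decidable (Spec_solution k tangerine out) := by unfold Spec_solution; infer_instance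

-- ===== CLAIM (what is proved, stated in full; the proofs are below) =====
def Claim_equal_solution : Prop := ∀ (k : Int) (tangerine : List Int), Dom_solution k tangerine → Pre_solution k tangerine → Spec_solution k tangerine (solution k tangerine)
-- ===== LEMMAS AND PROOFS =====

-- range(n, 0, -1) written as a map over List.range
theorem pyRange_down (n : Int) :
    PySem.List.pyRange n 0 (-1) = (List.range n.toNat).map (fun j : Nat => n - (j : Int)) := by
  simp only [PySem.List.pyRange]
  norm_num
  split_ifs with h1
  · exact List.map_congr_left (fun j _ => by omega)
  · have h0 : n.toNat = 0 := by omega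
    simp [h0]

theorem mem_pyRange_down {n x : Int} :
    x ∈ PySem.List.pyRange n 0 (-1) ↔ 1 ≤ x ∧ x ≤ n := by
  rw [pyRange_down]
  simp only [List.mem_map]
  constructor
  · rintro ⟨j, hj, rfl⟩
    have hj' : j < n.toNat := List.mem_range.mp hj
    omega
  · rintro ⟨h1, h2⟩
    exact ⟨(n - x).toNat, List.mem_range.mpr (by omega), by omega⟩

theorem pairwise_pyRange_down (n : Int) :
    (PySem.List.pyRange n 0 (-1)).Pairwise (fun a b => b < a) := by
  rw [pyRange_down]
  exact List.Pairwise.map _ (fun a b h => by omega) List.pairwise_lt_range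

-- inserting with the lexicographic (-snd, fst) comparator keeps snd nonincreasing
theorem insertBy_pairwise_snd (x : Int × Int) (ys : List (Int × Int))
    (h : ys.Pairwise (fun a b => b.2 ≤ a.2)) :
    (PySem.List.insertBy
      (fun a b => decide ((fun p : Int × Int => -p.2) a < (fun p : Int × Int => -p.2) b) ||
        !decide ((fun p : Int × Int => -p.2) b < (fun p : Int × Int => -p.2) a) &&
          decide ((fun p : Int × Int => (p.1 : Int)) a < (fun p : Int × Int => (p.1 : Int)) b))
      x ys).Pairwise (fun a b => b.2 ≤ a.2) := by
  induction ys with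
  | nil => simp [PySem.List.insertBy]
  | cons y t ih =>
    rw [List.pairwise_cons] at h
    rw [PySem.List.insertBy]
    split_ifs with hb
    · simp only [Bool.or_eq_true, Bool.and_eq_true, Bool.not_eq_true', decide_eq_true_eq,
        decide_eq_false_iff_not] at hb
      simp at hb
      refine List.Pairwise.cons ?_ (List.Pairwise.cons h.1 h.2)
      intro z hz
      rcases List.mem_cons.mp hz with rfl | hz
      · omega
      · have := h.1 z hz; omega
    · simp at hb
      refine List.Pairwise.cons ?_ (ih h.2)
      intro z hz
      rcases (PySem.List.insertBy_mem_iff _ _ _ _).mp hz with rfl | hz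
      · omega
      · exact h.1 z hz

theorem sorted2_pairwise_snd (li : List (Int × Int)) :
    (PySem.List.sorted2 li (fun x => -x.2) (fun x => x.1) false).Pairwise
      (fun a b => b.2 ≤ a.2) := by
  show (List.foldl _ [] li).Pairwise _
  generalize hacc : ([] : List (Int × Int)) = acc
  have hp : acc.Pairwise (fun a b : Int × Int => b.2 ≤ a.2) := by rw [← hacc]; simp
  clear hacc
  induction li generalizing acc with
  | nil => exact hp
  | cons y t ih => exact ih _ (insertBy_pairwise_snd y acc hp)

-- A's while loop only reads the counts
theorem loopA_eq_greedy (k : Int) (li : List (Int × Int)) (tmp answer : Int) :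
    loopA k li tmp answer = greedyB k (li.map Prod.snd) tmp answer := by
  induction li generalizing tmp answer with
  | nil => rw [loopA, greedyB.eq_def]; split_ifs with h <;> simp
  | cons p t ih =>
    rw [loopA, List.map_cons, greedyB]
    split_ifs with h1 h2 <;> first | omega | rw [ih]

-- counting an element in the bucket-flattened list
theorem count_flatMap_blocks (B : Int → Int) (m : Int) (l : List Int) (hnd : l.Nodup) :
    List.count m (l.flatMap (fun f => (PySem.List.pyRange 0 (B f) 1).map (fun _ => f)))
      = if m ∈ l then (B m).toNat else 0 := by
  induction l with
  | nil => simp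
  | cons f t ih =>
    rw [List.flatMap_cons, List.count_append, ih hnd.of_cons]
    rw [List.map_const', List.count_replicate]
    by_cases hm : m = f
    · subst hm
      have : m ∉ t := (List.nodup_cons.mp hnd).1
      simp [this]
    · simp [List.mem_cons, hm, Ne.symm hm]

-- every count of an element of the list is between 1 and the length
theorem count_mem_bounds {xs : List Int} {v : Int} (hv : v ∈ xs) :
    1 ≤ List.count v xs ∧ List.count v xs ≤ xs.length :=
  ⟨List.count_pos_iff.mpr hv, List.count_le_length⟩

-- B's flattened frequency list is a permutation of the multiset of counts
theorem freqs_perm (xs : List Int) :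
    ((PySem.List.pyRange (xs.length : Int) 0 (-1)).flatMap
      (fun f => (PySem.List.pyRange 0 ((PySem.Dict.counter ((PySem.Set.ofList xs).map (fun v => (List.count v xs : Int)))).getD f 0) 1).map (fun _ => f))).Perm
      ((PySem.Set.ofList xs).map (fun v => (List.count v xs : Int))) := by
  set cs := (PySem.Set.ofList xs).map (fun v => (List.count v xs : Int)) with hcs
  rw [List.perm_iff_count]
  intro m
  have hnd : (PySem.List.pyRange (xs.length : Int) 0 (-1)).Nodup :=
    (pairwise_pyRange_down _).imp (fun h => by omega)
  rw [count_flatMap_blocks _ m _ hnd]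
  have hget : ∀ f : Int, (PySem.Dict.counter cs).getD f 0 = (List.count f cs : Int) :=
    fun f => PySem.Dict.getD_counter cs f
  by_cases hm : m ∈ PySem.List.pyRange (xs.length : Int) 0 (-1)
  · rw [if_pos hm, hget]; omega
  · rw [if_neg hm]
    rw [mem_pyRange_down] at hm
    by_cases hmem : m ∈ cs
    · exfalso
      rw [hcs, List.mem_map] at hmem
      obtain ⟨v, hv, rfl⟩ := hmem
      have hb := count_mem_bounds ((PySem.Set.mem_ofList xs v).mp hv)
      omega
    · exact (List.count_eq_zero.mpr hmem).symm

-- B's flattened frequency list is nonincreasing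
theorem freqs_pairwise (xs : List Int) (B : Int → Int) :
    ((PySem.List.pyRange (xs.length : Int) 0 (-1)).flatMap
      (fun f => (PySem.List.pyRange 0 (B f) 1).map (fun _ => f))).Pairwise
      (fun a b => b ≤ a) := by
  rw [List.pairwise_flatMap]
  constructor
  · intro f _
    rw [List.map_const']
    exact List.pairwise_replicate.mpr (Or.inr (le_refl f))
  · refine (pairwise_pyRange_down _).imp ?_
    intro a b hab x hx y hy
    rw [List.map_const'] at hx hy
    rw [List.eq_of_mem_replicate hx, List.eq_of_mem_replicate hy]
    omega

theorem solution_eq_alt (k : Int) (tangerine : List Int) :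
    solution k tangerine = solution_alt k tangerine := by
  simp only [solution, solution_alt]
  rw [PySem.Dict.foldl_insert_getD_add_one_eq_counter]
  set xs := tangerine
  set cs := (PySem.Set.ofList xs).map (fun v => (List.count v xs : Int)) with hcs
  have hvals : (PySem.Dict.counter xs).values = cs := by
    show ((PySem.Dict.counter xs).items).map (fun x => x.2) = cs
    rw [PySem.Dict.items_counter, List.map_map]
    rfl
  rw [PySem.Dict.foldl_insert_getD_add_one_eq_counter, hvals]
  rw [loopA_eq_greedy]
  congr 1
  -- both frequency sequences are nonincreasing permutations of cs, hence equal
  have hli : ((PySem.Dict.counter xs).items.map (fun xy => (xy.1, xy.2))).map Prod.snd = cs := by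
    rw [PySem.Dict.items_counter, List.map_map, List.map_map]
    rfl
  have hpermA : ((PySem.List.sorted2 ((PySem.Dict.counter xs).items.map (fun xy => (xy.1, xy.2))) (fun x => -x.2) (fun x => x.1) false).map Prod.snd).Perm cs := by
    rw [← hli]
    exact (PySem.List.sorted2_perm _ _ _ _).map Prod.snd
  have hpwA : ((PySem.List.sorted2 ((PySem.Dict.counter xs).items.map (fun xy => (xy.1, xy.2))) (fun x => -x.2) (fun x => x.1) false).map Prod.snd).Pairwise (fun a b : Int => b ≤ a) := by
    rw [List.pairwise_map]
    exact sorted2_pairwise_snd _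
  have hpermB := freqs_perm xs
  have hpwB := freqs_pairwise xs (fun f => (PySem.Dict.counter cs).getD f 0)
  exact List.Perm.eq_of_pairwise (fun a b _ _ h1 h2 => le_antisymm h2 h1) hpwA hpwB
    (hpermA.trans hpermB.symm)

-- ===== VERDICT (by name: the statement is the Claim_ definition above) =====
theorem solution_spec : Claim_equal_solution := by
  intro k tangerine _ _
  unfold Spec_solution
  exact solution_eq_alt k tangerine
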